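-- pv_equiv track=rewrite | github.com/Kosmic-Development-Team/LambdaPlusPlus-Bot | bot/commands.py | _remove_unescaped_graves
-- ===== SOURCE A (Python) =====
-- def _remove_unescaped_graves(msg):
--     msg_split = msg.split('\\`')
--     new_msg = ''
--     first = True
--     for ms in msg_split:
--         ms = ms.replace('`', '')
--         if not first:
--             new_msg += '\\`'
--         else:
--             first = False
--         new_msg += ms
--     return new_msg
-- ===== SOURCE B (Python) =====
-- def _remove_unescaped_graves(msg):
--     out = []
--     i = 0
--     n = len(msg)
--     while i < n:
--         ch = msg[i]
--         if ch == '\\' and i + 1 < n and msg[i + 1] == '`':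
--             out.append('\\`')
--             i += 2
--         elif ch == '`':
--             i += 1
--         else:
--             out.append(ch)
--             i += 1
--     return ''.join(out)
-- ===== Notes on version B (the rewrite author's own statement) =====
-- stated objective: alternative
-- what changed: Replaced the split-into-pieces / strip-each-piece / rejoin-with-separator pipeline by a single left-to-right index scan that emits an escaped backtick whole, drops an unescaped backtick, and copies every other character directly into the output.
import Mathlib
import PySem

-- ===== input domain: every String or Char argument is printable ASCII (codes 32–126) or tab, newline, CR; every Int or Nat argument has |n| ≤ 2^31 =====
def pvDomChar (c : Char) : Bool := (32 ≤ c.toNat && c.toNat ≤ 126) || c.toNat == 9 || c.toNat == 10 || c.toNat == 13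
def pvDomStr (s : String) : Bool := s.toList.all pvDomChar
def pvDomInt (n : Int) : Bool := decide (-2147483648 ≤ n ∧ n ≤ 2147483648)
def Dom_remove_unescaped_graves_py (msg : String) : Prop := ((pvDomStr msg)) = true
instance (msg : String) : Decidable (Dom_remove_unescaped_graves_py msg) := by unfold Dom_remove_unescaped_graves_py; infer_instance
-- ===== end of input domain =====

-- B replaces A's split/strip/rejoin pipeline by one direct left-to-right scan (alternative decomposition, similar cost).

-- ===== PORT A =====
-- literal port of A: split on "\`", remove backticks from each piece, rejoin with "\`" via a first-flag loop
def remove_unescaped_graves_py (msg : String) : String :=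
  let msg_split := PySem.Chars.splitOn msg.toList ['\\', '`']
  let r := msg_split.foldl
    (fun (st : List Char × Bool) ms =>
      let ms := PySem.Chars.replace ms ['`'] []
      let new_msg := if !st.2 then st.1 ++ ['\\', '`'] else st.1
      (new_msg ++ ms, false))
    ([], true)
  String.ofList r.1

-- ===== PORT B =====
-- B's while-loop scan over the characters: an escaped backtick is kept whole (advance 2),
-- a lone backtick is dropped, any other character is copied
def scanGo : List Char → List Char
  | [] => []
  | '\\' :: '`' :: rest => '\\' :: '`' :: scanGo rest
  | '`' :: rest => scanGo rest
  | c :: rest => c :: scanGo rest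

def remove_unescaped_graves_py_alt (msg : String) : String :=
  String.ofList (scanGo msg.toList)

-- ===== PRECONDITION & SPEC =====
def Spec_remove_unescaped_graves_py (msg : String) (out : String) : Prop := out = remove_unescaped_graves_py_alt msg
instance (msg : String) (out : String) : Decidable (Spec_remove_unescaped_graves_py msg out) := by unfold Spec_remove_unescaped_graves_py; infer_instance

-- ===== CLAIM (what is proved, stated in full; the proofs are below) =====
def Claim_equal_remove_unescaped_graves_py : Prop := ∀ (msg : String), Dom_remove_unescaped_graves_py msg → Spec_remove_unescaped_graves_py msg (remove_unescaped_graves_py msg)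

-- ===== LEMMAS AND PROOFS =====

-- ms.replace('`','') is the backtick filter
def tickF (l : List Char) : List Char := l.filter (fun c => !(c == '`'))

-- pure specification of msg.split('\`') (left-to-right non-overlapping matches)
def splitSpec : List Char → List (List Char)
  | [] => [[]]
  | '\\' :: '`' :: rest => [] :: splitSpec rest
  | c :: rest =>
    match splitSpec rest with
    | p :: ps => (c :: p) :: ps
    | [] => [[c]]

-- A's loop over the pieces: filter each, join with "\`"
def joinF : List (List Char) → List Char
  | [] => []
  | p :: ps => tickF p ++ ps.flatMap (fun q => '\\' :: '`' :: tickF q)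

theorem replace_go_tick (fuel : Nat) : ∀ (l acc : List Char), l.length ≤ fuel →
    PySem.Chars.replace.go ['`'] [] fuel l acc = acc.reverse ++ tickF l := by
  induction fuel with
  | zero =>
    intro l acc h
    have : l = [] := List.eq_nil_of_length_eq_zero (Nat.le_zero.mp h)
    subst this
    simp [PySem.Chars.replace.go, tickF]
  | succ n ih =>
    intro l acc h
    cases l with
    | nil => simp [PySem.Chars.replace.go, tickF]
    | cons c t =>
      rw [PySem.Chars.replace.go]
      by_cases hc : c = '`'
      · subst hc
        have hpre : (['`'].isPrefixOf ('`' :: t)) = true := by simp [List.isPrefixOf]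
        rw [hpre]
        show PySem.Chars.replace.go ['`'] [] n (List.drop ['`'].length ('`' :: t)) ([].reverse ++ acc) = _
        simp only [List.length_singleton, List.drop_succ_cons, List.drop_zero, List.reverse_nil,
          List.nil_append]
        rw [ih t acc (Nat.le_of_succ_le_succ h)]
        simp [tickF]
      · have hpre : (['`'].isPrefixOf (c :: t)) = false := by
          simp [List.isPrefixOf]
          exact fun h' => absurd h'.symm hc
        rw [hpre]
        simp only [Bool.false_eq_true, if_false]
        rw [ih t (c :: acc) (Nat.le_of_succ_le_succ h)]
        simp [tickF, hc]

theorem replace_tick (l : List Char) :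
    PySem.Chars.replace l ['`'] [] = tickF l := by
  rw [PySem.Chars.replace]
  simp [replace_go_tick l.length l [] (le_refl _)]

theorem splitSpec_ne_nil (l : List Char) : splitSpec l ≠ [] := by
  induction l using splitSpec.induct with
  | case1 => simp [splitSpec]
  | case2 rest ih => simp [splitSpec]
  | case3 c rest h p ps hps ih => rw [splitSpec.eq_3 c rest h, hps]; simp
  | case4 c rest h hnil ih => exact absurd hnil ih

theorem splitOn_go_spec (fuel : Nat) : ∀ (l cur : List Char) (acc : List (List Char)),
    l.length ≤ fuel →
    PySem.Chars.splitOn.go ['\\', '`'] fuel l cur acc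
      = acc.reverse ++ (splitSpec l).modifyHead (fun p => cur.reverse ++ p) := by
  induction fuel with
  | zero =>
    intro l cur acc h
    have : l = [] := List.eq_nil_of_length_eq_zero (Nat.le_zero.mp h)
    subst this
    simp [PySem.Chars.splitOn.go, splitSpec]
  | succ n ih =>
    intro l cur acc h
    cases l with
    | nil => simp [PySem.Chars.splitOn.go, splitSpec]
    | cons c t =>
      rw [PySem.Chars.splitOn.go]
      by_cases hpre : (['\\', '`'].isPrefixOf (c :: t)) = true
      · rw [if_pos hpre]
        obtain ⟨hc, t2, ht⟩ : c = '\\' ∧ ∃ t2, t = '`' :: t2 := by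
          cases t with
          | nil => simp [List.isPrefixOf] at hpre
          | cons d r =>
            simp [List.isPrefixOf] at hpre
            exact ⟨hpre.1.symm, r, by rw [← hpre.2]⟩
        subst hc; subst ht
        have hlen : t2.length ≤ n := by simp at h; omega
        rw [show List.drop (['\\', '`'].length) ('\\' :: '`' :: t2) = t2 from rfl]
        rw [ih t2 [] (cur.reverse :: acc) hlen]
        rw [splitSpec.eq_2]
        simp
        cases splitSpec t2 <;> simp
      · rw [if_neg hpre]
        have hlen : t.length ≤ n := Nat.le_of_succ_le_succ h
        rw [ih t (c :: cur) acc hlen]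
        have hno : ∀ (r2 : List Char), c = '\\' → t = '`' :: r2 → False := by
          intro r2 hc ht
          subst hc; subst ht
          simp [List.isPrefixOf] at hpre
        rw [splitSpec.eq_3 c t hno]
        obtain ⟨p, ps, hps⟩ : ∃ p ps, splitSpec t = p :: ps := by
          cases hsp : splitSpec t with
          | nil => exact absurd hsp (splitSpec_ne_nil t)
          | cons p ps => exact ⟨p, ps, rfl⟩
        rw [hps]
        simp

theorem splitOn_eq_splitSpec (l : List Char) :
    PySem.Chars.splitOn l ['\\', '`'] = splitSpec l := by
  rw [PySem.Chars.splitOn]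
  rw [splitOn_go_spec (l.length + 1) l [] [] (Nat.le_succ _)]
  simp
  cases splitSpec l <;> simp

-- A's fold function, with replace already rewritten to the backtick filter
theorem foldA_fun_eq :
    (fun (st : List Char × Bool) ms =>
      let ms := PySem.Chars.replace ms ['`'] []
      let new_msg := if !st.2 then st.1 ++ ['\\', '`'] else st.1
      (new_msg ++ ms, false))
    = (fun (st : List Char × Bool) ms =>
        ((if !st.2 then st.1 ++ ['\\', '`'] else st.1) ++ tickF ms, false)) := by
  funext st ms
  simp [replace_tick]

-- A's fold after the first piece appends "\`" before every further filtered piece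
theorem foldA_false (ps : List (List Char)) : ∀ (pre : List Char),
    (ps.foldl
      (fun (st : List Char × Bool) ms =>
        ((if !st.2 then st.1 ++ ['\\', '`'] else st.1) ++ tickF ms, false))
      (pre, false)).1
      = pre ++ ps.flatMap (fun q => '\\' :: '`' :: tickF q) := by
  induction ps with
  | nil => intro pre; simp
  | cons q qs ih =>
    intro pre
    simp only [List.foldl_cons]
    rw [show (if !false then pre ++ ['\\', '`'] else pre) = pre ++ ['\\', '`'] by simp]
    rw [ih]
    simp

theorem foldA_joinF (p : List Char) (ps : List (List Char)) :
    ((p :: ps).foldl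
      (fun (st : List Char × Bool) ms =>
        let ms := PySem.Chars.replace ms ['`'] []
        let new_msg := if !st.2 then st.1 ++ ['\\', '`'] else st.1
        (new_msg ++ ms, false))
      ([], true)).1
      = joinF (p :: ps) := by
  rw [foldA_fun_eq]
  simp only [List.foldl_cons]
  rw [show (if !true then ([] : List Char) ++ ['\\', '`'] else ([] : List Char)) ++ tickF p = tickF p by simp]
  rw [foldA_false ps (tickF p)]
  rfl

theorem joinF_splitSpec_eq_scanGo (l : List Char) : joinF (splitSpec l) = scanGo l := by
  induction l using splitSpec.induct with
  | case1 => simp [splitSpec, joinF, tickF, scanGo]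
  | case2 rest ih =>
    rw [splitSpec.eq_2, scanGo.eq_2, ← ih]
    obtain ⟨q, qs, hq⟩ : ∃ q qs, splitSpec rest = q :: qs := by
      cases hsp : splitSpec rest with
      | nil => exact absurd hsp (splitSpec_ne_nil rest)
      | cons q qs => exact ⟨q, qs, rfl⟩
    rw [hq]
    simp [joinF, tickF]
  | case3 c rest h p ps hps ih =>
    rw [splitSpec.eq_3 c rest h, hps]
    rw [hps] at ih
    by_cases hc : c = '`'
    · subst hc
      rw [scanGo.eq_3, ← ih]
      simp [joinF, tickF]
    · rw [scanGo.eq_4 c rest h (fun h' => hc h'), ← ih]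
      simp [joinF, tickF, hc]
  | case4 c rest h hnil ih => exact absurd hnil (splitSpec_ne_nil rest)

-- ===== VERDICT (by name: the statement is the Claim_ definition above) =====
theorem remove_unescaped_graves_py_spec : Claim_equal_remove_unescaped_graves_py := by
  intro msg _
  unfold Spec_remove_unescaped_graves_py remove_unescaped_graves_py remove_unescaped_graves_py_alt
  simp only [splitOn_eq_splitSpec]
  obtain ⟨p, ps, hps⟩ : ∃ p ps, splitSpec msg.toList = p :: ps := by
    cases hsp : splitSpec msg.toList with
    | nil => exact absurd hsp (splitSpec_ne_nil _)
    | cons p ps => exact ⟨p, ps, rfl⟩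
  rw [hps]
  rw [foldA_joinF p ps]
  rw [← hps, joinF_splitSpec_eq_scanGo]
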